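-- pv_equiv track=rewrite | github.com/pypi-data/pypi-mirror-67 | packages/pytakes/pytakes-1.0.5-py3-none-any.whl/pytakes/nlp/sentence_boundary.py | has_dot
-- ===== SOURCE A (Python) =====
-- def has_dot(word):
--     """
--     Return the position of '.' in a word. -1 denote there are no '.' appeared
--     :param word:
--     """
--     i = 0
--     lenn = len(word)
--     while i < lenn:
--         if word[i] == '.' or word[i] == '!' or word[i] == '?' or word[i] == ';':
--             return i
--         i += 1
--     return - 1
-- ===== SOURCE B (Python) =====
-- def has_dot(word):
--     hits = [i for i in (word.find(ch) for ch in '.!?;') if i != -1]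
--     return min(hits) if hits else -1
-- ===== Notes on version B (the rewrite author's own statement) =====
-- stated objective: idiomatic
-- what changed: Replaces A's index-based guarded character scan with four independent str.find searches whose non-(-1) results are reduced with min (-1 if none hit).
import Mathlib
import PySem

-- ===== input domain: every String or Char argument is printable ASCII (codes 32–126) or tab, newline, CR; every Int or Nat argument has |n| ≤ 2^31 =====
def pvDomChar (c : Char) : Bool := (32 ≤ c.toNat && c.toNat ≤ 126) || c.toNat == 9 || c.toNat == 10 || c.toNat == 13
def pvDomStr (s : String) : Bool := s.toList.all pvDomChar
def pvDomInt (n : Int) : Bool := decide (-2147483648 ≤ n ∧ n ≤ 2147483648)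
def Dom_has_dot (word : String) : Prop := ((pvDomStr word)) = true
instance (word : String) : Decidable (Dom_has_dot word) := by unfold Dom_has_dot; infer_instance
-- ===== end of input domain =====

-- B replaces A's single guarded index scan with four independent find searches reduced by min (idiomatic; same O(n) cost).

-- ===== PORT A =====
-- while-loop over the characters with the running index i
def has_dot_go : List Char → Int → Int
  | [], _ => -1
  | c :: t, i =>
    if c = '.' ∨ c = '!' ∨ c = '?' ∨ c = ';' then i else has_dot_go t (i + 1)

def has_dot (word : String) : Int := has_dot_go word.toList 0

-- ===== PORT B =====
def has_dot_alt (word : String) : Int :=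
  let hits := ((['.', '!', '?', ';'] : List Char).map
      (fun ch => PySem.Str.find word (String.ofList [ch]))).filter (fun i => i ≠ -1)
  match PySem.List.min? hits (fun x => x) with
  | some m => m
  | none => -1

-- ===== PRECONDITION & SPEC =====
def Spec_has_dot (word : String) (out : Int) : Prop := out = has_dot_alt word
instance (word : String) (out : Int) : Decidable (Spec_has_dot word out) := by unfold Spec_has_dot; infer_instance

-- ===== CLAIM (what is proved, stated in full; the proofs are below) =====
def Claim_equal_has_dot : Prop := ∀ (word : String), Dom_has_dot word → Spec_has_dot word (has_dot word)

-- ===== LEMMAS AND PROOFS =====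
set_option maxHeartbeats 2000000

lemma min?_nil_int : PySem.List.min? ([] : List Int) (fun x => x) = none := rfl

-- B's body on the character list, with the four single-char finds named
def pvCombine (a b c d : Int) : Int :=
  match PySem.List.min? (([a, b, c, d]).filter (fun i => i ≠ -1)) (fun x => x) with
  | some m => m
  | none => -1

def pvAltCore (l : List Char) : Int :=
  pvCombine (PySem.Chars.find l ['.']) (PySem.Chars.find l ['!'])
            (PySem.Chars.find l ['?']) (PySem.Chars.find l [';'])

lemma alt_eq_core (word : String) : has_dot_alt word = pvAltCore word.toList := by
  simp [has_dot_alt, pvAltCore, pvCombine, PySem.Str.find, List.map, List.filter,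
    String.toList_ofList]

-- A's scan: result is -1 or ≥ the start index
lemma go_lb (l : List Char) : ∀ k : Int, has_dot_go l k = -1 ∨ k ≤ has_dot_go l k := by
  induction l with
  | nil => intro k; left; rfl
  | cons c t ih =>
    intro k
    simp only [has_dot_go]
    split_ifs with h
    · right; exact le_refl k
    · rcases ih (k + 1) with h1 | h1
      · left; exact h1
      · right; omega

-- A's scan shifted by the start index
lemma go_shift (l : List Char) : ∀ k : Int,
    has_dot_go l k = if has_dot_go l 0 = -1 then -1 else k + has_dot_go l 0 := by
  induction l with
  | nil => intro k; rfl
  | cons c t ih =>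
    intro k
    simp only [has_dot_go]
    by_cases h : c = '.' ∨ c = '!' ∨ c = '?' ∨ c = ';'
    · simp [h]
    · rw [if_neg h, if_neg h, ih (0 + 1), ih (k + 1)]
      rcases go_lb t 0 with h3 | h3 <;> split_ifs <;> omega

-- single-character find, unfolded one step
lemma findgo_shift (ch : Char) (l : List Char) : ∀ k : Nat,
    PySem.Chars.find.go [ch] l k =
      if PySem.Chars.find l [ch] = -1 then -1 else (k : Int) + PySem.Chars.find l [ch] := by
  induction l with
  | nil => intro k; simp [PySem.Chars.find, PySem.Chars.find.go]
  | cons c t ih =>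
    intro k
    rw [show PySem.Chars.find.go [ch] (c :: t) k =
        (if List.isPrefixOf [ch] (c :: t) then (k : Int) else PySem.Chars.find.go [ch] t (k + 1))
      from rfl]
    rw [show PySem.Chars.find (c :: t) [ch] =
        (if List.isPrefixOf [ch] (c :: t) then (0 : Int) else PySem.Chars.find.go [ch] t 1)
      from rfl]
    by_cases h : List.isPrefixOf [ch] (c :: t) = true
    · rw [if_pos h, if_pos h]; norm_num
    · rw [if_neg h, if_neg h, ih (k + 1), ih 1]
      have := PySem.Chars.neg_one_le_find t [ch]
      split_ifs <;> push_cast <;> omega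

lemma find_cons (ch c : Char) (t : List Char) :
    PySem.Chars.find (c :: t) [ch] =
      if c = ch then 0
      else if PySem.Chars.find t [ch] = -1 then -1 else PySem.Chars.find t [ch] + 1 := by
  rw [show PySem.Chars.find (c :: t) [ch] =
      (if List.isPrefixOf [ch] (c :: t) then (0 : Int) else PySem.Chars.find.go [ch] t 1)
    from rfl]
  by_cases h : c = ch
  · subst h
    rw [if_pos rfl, if_pos (by simp [List.isPrefixOf])]
  · rw [if_neg h, if_neg (show ¬List.isPrefixOf [ch] (c :: t) = true by
      simp [List.isPrefixOf]; exact fun e => h e.symm)]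
    rw [findgo_shift ch t 1]
    split_ifs <;> push_cast <;> omega

-- the shift map on find results
lemma combine_shift (a b c d : Int) (ha : -1 ≤ a) (hb : -1 ≤ b) (hc : -1 ≤ c) (hd : -1 ≤ d) :
    pvCombine (if a = -1 then -1 else a + 1) (if b = -1 then -1 else b + 1)
              (if c = -1 then -1 else c + 1) (if d = -1 then -1 else d + 1)
      = if pvCombine a b c d = -1 then -1 else pvCombine a b c d + 1 := by
  rcases eq_or_ne a (-1) with rfl | ha' <;> rcases eq_or_ne b (-1) with rfl | hb' <;>
    rcases eq_or_ne c (-1) with rfl | hc' <;> rcases eq_or_ne d (-1) with rfl | hd'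
  all_goals (try (have ha2 : a + 1 ≠ -1 := by omega))
  all_goals (try (have hb2 : b + 1 ≠ -1 := by omega))
  all_goals (try (have hc2 : c + 1 ≠ -1 := by omega))
  all_goals (try (have hd2 : d + 1 ≠ -1 := by omega))
  all_goals (try simp_all [pvCombine, List.filter, PySem.List.min?_id_cons, min?_nil_int, min_def])
  all_goals (try split_ifs)
  all_goals (try simp_all)
  all_goals omega

lemma combine_lb (a b c d : Int) (ha : -1 ≤ a) (hb : -1 ≤ b) (hc : -1 ≤ c) (hd : -1 ≤ d) :
    -1 ≤ pvCombine a b c d := by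
  rcases eq_or_ne a (-1) with rfl | ha' <;> rcases eq_or_ne b (-1) with rfl | hb' <;>
    rcases eq_or_ne c (-1) with rfl | hc' <;> rcases eq_or_ne d (-1) with rfl | hd'
  all_goals (try simp_all [pvCombine, List.filter, PySem.List.min?_id_cons, min?_nil_int, min_def])
  all_goals (try split_ifs)
  all_goals (try simp_all)
  all_goals omega

-- main correspondence between the scan and the min of the four finds
lemma core_scan (l : List Char) : has_dot_go l 0 = pvAltCore l := by
  induction l with
  | nil =>
    simp [has_dot_go, pvAltCore, pvCombine, PySem.Chars.find, PySem.Chars.find.go,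
      PySem.List.min?]
  | cons c t ih =>
    have h1 := PySem.Chars.neg_one_le_find t ['.']
    have h2 := PySem.Chars.neg_one_le_find t ['!']
    have h3 := PySem.Chars.neg_one_le_find t ['?']
    have h4 := PySem.Chars.neg_one_le_find t [';']
    by_cases h : c = '.' ∨ c = '!' ∨ c = '?' ∨ c = ';'
    · rcases h with h | h | h | h <;> subst h <;>
        simp only [has_dot_go, pvAltCore, find_cons] <;>
        rcases eq_or_ne (PySem.Chars.find t ['.']) (-1) with he1 | he1 <;>
        rcases eq_or_ne (PySem.Chars.find t ['!']) (-1) with he2 | he2 <;>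
        rcases eq_or_ne (PySem.Chars.find t ['?']) (-1) with he3 | he3 <;>
        rcases eq_or_ne (PySem.Chars.find t [';']) (-1) with he4 | he4
      all_goals (try (have hf1 : PySem.Chars.find t ['.'] + 1 ≠ -1 := by omega))
      all_goals (try (have hf2 : PySem.Chars.find t ['!'] + 1 ≠ -1 := by omega))
      all_goals (try (have hf3 : PySem.Chars.find t ['?'] + 1 ≠ -1 := by omega))
      all_goals (try (have hf4 : PySem.Chars.find t [';'] + 1 ≠ -1 := by omega))
      all_goals (try simp_all [pvCombine, List.filter, PySem.List.min?_id_cons, min?_nil_int, min_def])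
      all_goals (try split_ifs)
      all_goals (try simp_all)
      all_goals omega
    · push_neg at h
      obtain ⟨n1, n2, n3, n4⟩ := h
      simp only [has_dot_go, if_neg (show ¬(c = '.' ∨ c = '!' ∨ c = '?' ∨ c = ';') by tauto)]
      rw [go_shift t (0 + 1), ih]
      unfold pvAltCore
      simp only [find_cons, if_neg n1, if_neg n2, if_neg n3, if_neg n4]
      rw [combine_shift _ _ _ _ h1 h2 h3 h4]
      have := combine_lb (PySem.Chars.find t ['.']) (PySem.Chars.find t ['!'])
        (PySem.Chars.find t ['?']) (PySem.Chars.find t [';']) h1 h2 h3 h4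
      split_ifs <;> omega

-- ===== VERDICT (by name: the statement is the Claim_ definition above) =====
theorem has_dot_spec : Claim_equal_has_dot := by
  intro word _
  unfold Spec_has_dot
  rw [alt_eq_core, has_dot]
  exact core_scan word.toList
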